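-- pv_equiv track=rewrite | github.com/NeuroTechX/EEG-ExPy | eegnb/cli/utils.py | makeoddball
-- ===== SOURCE A (Python) =====
-- def makeoddball(inputs, rep):
--     # based on inputs, creating oddball paradigms markers depending on "switch"
--     value = inputs[0]
--     count = 0
--     markerArray = []
--     for i in range(len(inputs)):
--         if inputs[i] == value:
--             count += 1
--             if count == rep:
--                 markerArray.append(1)
--             else:
--                 markerArray.append(3)
--         else:
--             if count == rep + 1:
--                 markerArray.append(2)
--
--             else:
--                 markerArray.append(4)
--             value = inputs[i]
--             count = 1
--     return markerArray
-- ===== SOURCE B (Python) =====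
-- def makeoddball(inputs, rep):
--     # Two-phase re-implementation: run-length encode the input, then emit
--     # markers run by run (first run counts from 1; each later run starts with
--     # a switch marker decided by the previous run's length, then counts from 2).
--     runs = []
--     for x in inputs:
--         if runs and runs[-1][0] == x:
--             runs[-1][1] += 1
--         else:
--             runs.append([x, 1])
--     out = []
--     prev_len = None
--     for v, L in runs:
--         if prev_len is None:
--             out += [1 if k == rep else 3 for k in range(1, L + 1)]
--         else:
--             out.append(2 if prev_len == rep + 1 else 4)
--             out += [1 if k == rep else 3 for k in range(2, L + 1)]
--         prev_len = L
--     return out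
-- ===== Notes on version B (the rewrite author's own statement) =====
-- stated objective: alternative
-- what changed: B run-length encodes the input first and then emits markers run by run (first run counts from 1, each later run emits one switch marker from the previous run's length then counts from 2), instead of A's single stateful element-by-element scan.
import Mathlib
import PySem

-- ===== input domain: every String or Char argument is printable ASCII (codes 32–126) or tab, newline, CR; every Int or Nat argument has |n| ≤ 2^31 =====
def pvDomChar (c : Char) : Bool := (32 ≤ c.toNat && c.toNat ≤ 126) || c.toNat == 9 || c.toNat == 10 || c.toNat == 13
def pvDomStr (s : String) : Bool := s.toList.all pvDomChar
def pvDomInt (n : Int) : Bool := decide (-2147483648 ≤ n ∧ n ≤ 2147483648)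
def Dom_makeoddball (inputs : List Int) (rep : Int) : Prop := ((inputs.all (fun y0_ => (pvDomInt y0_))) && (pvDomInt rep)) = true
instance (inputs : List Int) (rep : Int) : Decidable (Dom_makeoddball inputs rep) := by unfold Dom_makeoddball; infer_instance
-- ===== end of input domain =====

-- B run-length encodes the input and then emits markers run by run, an alternative
-- two-phase decomposition of A's single stateful scan; same O(n) cost.


-- ===== PORT A =====
-- literal transliteration of A: value = inputs[0] (IndexError on [] → outside Pre_),
-- then one fold over the elements carrying (value, count, markerArray).
def makeoddball (inputs : List Int) (rep : Int) : List Int :=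
  match PySem.List.pyGet? inputs 0 with
  | none => []   -- Python raises IndexError here; excluded by Pre_makeoddball
  | some v0 =>
    (inputs.foldl (fun (st : Int × Int × List Int) x =>
      let value := st.1; let count := st.2.1; let acc := st.2.2
      if x = value then
        (value, count + 1, acc ++ [if count + 1 = rep then 1 else 3])
      else
        (x, 1, acc ++ [if count = rep + 1 then 2 else 4])) (v0, 0, [])).2.2

-- ===== PORT B =====
-- B phase 1: run-length encoding. runs kept most-recent-first (Python mutates runs[-1]);
-- reversed at the end.
def pvBump (rs : List (Int × Int)) (x : Int) : List (Int × Int) :=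
  match rs with
  | [] => [(x, 1)]
  | (v, c) :: rest => if x = v then (v, c + 1) :: rest else (x, 1) :: (v, c) :: rest

-- B phase 2: fold over the runs with state (prev_len : Option Int, out).
def makeoddball_alt (inputs : List Int) (rep : Int) : List Int :=
  (((inputs.foldl pvBump []).reverse).foldl (fun (st : Option Int × List Int) vl =>
    match st.1 with
    | none => (some vl.2, st.2 ++ (PySem.List.pyRange 1 (vl.2 + 1) 1).map (fun k => if k = rep then 1 else 3))
    | some p => (some vl.2, st.2 ++ [if p = rep + 1 then 2 else 4]
                  ++ (PySem.List.pyRange 2 (vl.2 + 1) 1).map (fun k => if k = rep then 1 else 3)))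
    (none, [])).2

-- ===== PRECONDITION & SPEC =====
-- A evaluates inputs[0]: it raises IndexError exactly on the empty list.
def Pre_makeoddball (inputs : List Int) (rep : Int) : Prop := inputs ≠ []
instance (inputs : List Int) (rep : Int) : Decidable (Pre_makeoddball inputs rep) := by unfold Pre_makeoddball; infer_instance
def pvWitness_makeoddball : List Int × Int := ([5, 5, 5, 7, 5], 3)

def Spec_makeoddball (inputs : List Int) (rep : Int) (out : List Int) : Prop := out = makeoddball_alt inputs rep
instance (inputs : List Int) (rep : Int) (out : List Int) : Decidable (Spec_makeoddball inputs rep out) := by unfold Spec_makeoddball; infer_instance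

-- ===== CLAIM (what is proved, stated in full; the proofs are below) =====
def Claim_equal_makeoddball : Prop := ∀ (inputs : List Int) (rep : Int), Dom_makeoddball inputs rep → Pre_makeoddball inputs rep → Spec_makeoddball inputs rep (makeoddball inputs rep)

-- ===== LEMMAS AND PROOFS =====

-- A's loop body as structural recursion over the remaining input.
def pvFA (rep : Int) : List Int → Int → Int → List Int
  | [], _, _ => []
  | x :: t, v, c =>
    if x = v then (if c + 1 = rep then 1 else 3) :: pvFA rep t v (c + 1)
    else (if c = rep + 1 then 2 else 4) :: pvFA rep t x 1

-- run-length encoding from the left, current run (v, c)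
def pvRLE : List Int → Int → Int → List (Int × Int)
  | [], v, c => [(v, c)]
  | x :: t, v, c => if x = v then pvRLE t v (c + 1) else (v, c) :: pvRLE t x 1

def pvMarks (rep a b : Int) : List Int :=
  (PySem.List.pyRange a b 1).map (fun k => if k = rep then 1 else 3)

def pvEmitRest (rep : Int) : List (Int × Int) → Int → List Int
  | [], _ => []
  | (_, L) :: r, p =>
    (if p = rep + 1 then 2 else 4) :: (pvMarks rep 2 (L + 1) ++ pvEmitRest rep r L)

def pvContFrom (rep : Int) : List (Int × Int) → Int → List Int
  | [], _ => []
  | (_, L) :: r, c => pvMarks rep (c + 1) (L + 1) ++ pvEmitRest rep r L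

lemma pvFA_fold (rep : Int) (l : List Int) : ∀ (v c : Int) (acc : List Int),
    (l.foldl (fun (st : Int × Int × List Int) x =>
      let value := st.1; let count := st.2.1; let acc := st.2.2
      if x = value then
        (value, count + 1, acc ++ [if count + 1 = rep then 1 else 3])
      else
        (x, 1, acc ++ [if count = rep + 1 then 2 else 4])) (v, c, acc)).2.2
    = acc ++ pvFA rep l v c := by
  induction l with
  | nil => intro v c acc; simp [pvFA]
  | cons x t ih =>
    intro v c acc
    by_cases h : x = v <;> simp [List.foldl_cons, h, pvFA, ih]

lemma pvRLE_fold (l : List Int) : ∀ (v c : Int) (rs : List (Int × Int)),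
    (l.foldl pvBump ((v, c) :: rs)).reverse = rs.reverse ++ pvRLE l v c := by
  induction l with
  | nil => intro v c rs; simp [pvRLE]
  | cons x t ih =>
    intro v c rs
    by_cases h : x = v
    · simp [List.foldl_cons, pvBump, h, ih, pvRLE]
    · simp [List.foldl_cons, pvBump, h, pvRLE]
      have := ih x 1 ((v, c) :: rs)
      simpa using this
lemma pvEmit_fold (rep : Int) (runs : List (Int × Int)) : ∀ (p : Int) (out : List Int),
    (runs.foldl (fun (st : Option Int × List Int) vl =>
      match st.1 with
      | none => (some vl.2, st.2 ++ (PySem.List.pyRange 1 (vl.2 + 1) 1).map (fun k => if k = rep then 1 else 3))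
      | some p => (some vl.2, st.2 ++ [if p = rep + 1 then 2 else 4]
                    ++ (PySem.List.pyRange 2 (vl.2 + 1) 1).map (fun k => if k = rep then 1 else 3)))
      (some p, out)).2 = out ++ pvEmitRest rep runs p := by
  induction runs with
  | nil => intro p out; simp [pvEmitRest]
  | cons vl r ih =>
    intro p out
    obtain ⟨v, L⟩ := vl
    rw [List.foldl_cons]
    exact (ih L _).trans (by simp [pvEmitRest, pvMarks])

-- the head run of pvRLE l v c carries value v and a length ≥ c
lemma pvRLE_shape (l : List Int) : ∀ (v c : Int), ∃ L r, pvRLE l v c = (v, L) :: r ∧ c ≤ L := by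
  induction l with
  | nil => intro v c; exact ⟨c, [], rfl, le_refl c⟩
  | cons x t ih =>
    intro v c
    by_cases h : x = v
    · obtain ⟨L, r, hE, hL⟩ := ih v (c + 1)
      exact ⟨L, r, by simp [pvRLE, h, hE], by omega⟩
    · exact ⟨c, pvRLE t x 1, by simp [pvRLE, h], le_refl c⟩

lemma pvMarks_nil (rep a : Int) : pvMarks rep a a = [] := by
  simp [pvMarks, PySem.List.pyRange_one_eq_nil (le_refl a)]

lemma pvMarks_cons (rep a b : Int) (h : a < b) :
    pvMarks rep a b = (if a = rep then 1 else 3) :: pvMarks rep (a + 1) b := by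
  simp [pvMarks, PySem.List.pyRange_one_cons h]

-- MAIN: A's scan from mid-run state (v, c) equals B's run-by-run emission
lemma pvMain (rep : Int) (l : List Int) : ∀ (v c : Int),
    pvFA rep l v c = pvContFrom rep (pvRLE l v c) c := by
  induction l with
  | nil =>
    intro v c
    simp [pvFA, pvRLE, pvContFrom, pvMarks_nil, pvEmitRest]
  | cons x t ih =>
    intro v c
    by_cases h : x = v
    · obtain ⟨L, r, hE, hL⟩ := pvRLE_shape t v (c + 1)
      have hstep : pvRLE (x :: t) v c = pvRLE t v (c + 1) := by simp [pvRLE, h]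
      rw [hstep, hE]
      have hIH := ih v (c + 1)
      rw [hE] at hIH
      have hm := pvMarks_cons rep (c + 1) (L + 1) (by omega)
      simp [pvFA, h, hIH, pvContFrom, hm]
    · obtain ⟨L, r, hE, hL⟩ := pvRLE_shape t x 1
      have hstep : pvRLE (x :: t) v c = (v, c) :: pvRLE t x 1 := by simp [pvRLE, h]
      rw [hstep, hE]
      have hIH := ih x 1
      rw [hE] at hIH
      simp [pvFA, h, hIH, pvContFrom, pvEmitRest, pvMarks_nil]

-- ===== VERDICT (by name: the statement is the Claim_ definition above) =====
theorem makeoddball_spec : Claim_equal_makeoddball := by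
  intro inputs rep _ hpre
  unfold Spec_makeoddball
  match inputs, hpre with
  | x :: t, _ =>
    -- A side
    have hA : makeoddball (x :: t) rep = pvFA rep (x :: t) x 0 := by
      unfold makeoddball
      have h0 : PySem.List.pyGet? (x :: t) 0 = some x := by
        simp [PySem.List.pyGet?, PySem.List.pyIdx?]
      rw [h0]
      exact (pvFA_fold rep (x :: t) x 0 []).trans (by simp)
    -- B side
    obtain ⟨L, r, hE, hL⟩ := pvRLE_shape t x 1
    have hruns : ((x :: t).foldl pvBump []).reverse = pvRLE t x 1 := by
      have h1 : (x :: t).foldl pvBump [] = t.foldl pvBump [(x, 1)] := by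
        rw [List.foldl_cons]; rfl
      rw [h1]
      simpa using pvRLE_fold t x 1 []
    have hB : makeoddball_alt (x :: t) rep = pvContFrom rep (pvRLE t x 1) 0 := by
      unfold makeoddball_alt
      rw [hruns, hE, List.foldl_cons]
      exact (pvEmit_fold rep r L _).trans (by simp [pvContFrom, pvMarks])
    rw [hA, hB, pvMain rep (x :: t) x 0]
    have : pvRLE (x :: t) x 0 = pvRLE t x 1 := by simp [pvRLE]
    rw [this]
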